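-- pv_equiv track=rewrite | github.com/MeNicolas/SpamDetector | api/main.py | capital_sequences
-- ===== SOURCE A (Python) =====
-- def capital_sequences(mail):
-- 	seq = []
-- 	current = ''
--
-- 	for c in mail:
-- 		if c.isupper():
-- 			current += c
-- 		else:
-- 			if len(current) > 0:
-- 				seq.append(current)
-- 				current = ''
--
-- 	if len(current) > 0:
-- 		seq.append(current)
--
-- 	return seq
-- ===== SOURCE B (Python) =====
-- def capital_sequences(mail):
--     res = []
--     i = 0
--     n = len(mail)
--     while i < n:
--         if mail[i].isupper():
--             j = i + 1
--             while j < n and mail[j].isupper():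
--                 j += 1
--             res.append(mail[i:j])
--             i = j
--         else:
--             i += 1
--     return res
-- ===== Notes on version B (the rewrite author's own statement) =====
-- stated objective: alternative
-- what changed: Replaces the per-character accumulator-and-flush loop with an index-based two-pointer scan that finds each maximal uppercase run and appends one slice mail[i:j] per run.
import Mathlib
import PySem

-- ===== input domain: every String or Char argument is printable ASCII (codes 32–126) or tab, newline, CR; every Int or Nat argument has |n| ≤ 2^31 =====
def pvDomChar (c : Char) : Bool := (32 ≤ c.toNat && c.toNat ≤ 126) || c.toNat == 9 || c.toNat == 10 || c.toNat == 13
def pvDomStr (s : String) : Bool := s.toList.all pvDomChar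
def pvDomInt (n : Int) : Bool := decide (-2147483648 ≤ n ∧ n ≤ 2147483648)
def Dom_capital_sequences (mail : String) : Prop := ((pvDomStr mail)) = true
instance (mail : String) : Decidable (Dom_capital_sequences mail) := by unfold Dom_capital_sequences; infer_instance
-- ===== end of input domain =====

-- B replaces A's accumulator-and-flush loop with an index-based two-pointer scan slicing out each maximal uppercase run (alternative decomposition, same cost).

-- ===== PORT A =====
-- A's loop state: (seq, current); current kept as List Char, turned into a String when flushed.
def csStep (st : List String × List Char) (c : Char) : List String × List Char :=
  if PySem.Chars.isupper c then (st.1, st.2 ++ [c])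
  else if st.2.length > 0 then (st.1 ++ [String.ofList st.2], ([] : List Char)) else st

def capital_sequences (mail : String) : List String :=
  let st := mail.toList.foldl csStep ([], [])
  if st.2.length > 0 then st.1 ++ [String.ofList st.2] else st.1

-- ===== PORT B =====
-- inner while loop: advance j while j < n and mail[j].isupper()
def bScan (cs : List Char) (j : Nat) : Nat :=
  if h : j < cs.length then
    if PySem.Chars.isupper cs[j] then bScan cs (j + 1) else j
  else j
termination_by cs.length - j

-- needed by bGo's termination proof
theorem bScan_ge (cs : List Char) (j : Nat) : j ≤ bScan cs j := by
  fun_induction bScan cs j with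
  | case1 h hu ih => omega
  | case2 h hu => omega
  | case3 h => omega

-- outer while loop over index i
def bGo (cs : List Char) (i : Nat) (res : List String) : List String :=
  if h : i < cs.length then
    if PySem.Chars.isupper cs[i] then
      let j := bScan cs (i + 1)
      bGo cs j (res ++ [String.ofList (PySem.List.slice cs (some (i : Int)) (some (j : Int)))])
    else bGo cs (i + 1) res
  else res
termination_by cs.length - i
decreasing_by
  · have := bScan_ge cs (i + 1); omega
  · omega

def capital_sequences_alt (mail : String) : List String := bGo mail.toList 0 []

-- ===== PRECONDITION & SPEC =====
def Spec_capital_sequences (mail : String) (out : List String) : Prop := out = capital_sequences_alt mail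
instance (mail : String) (out : List String) : Decidable (Spec_capital_sequences mail out) := by unfold Spec_capital_sequences; infer_instance

-- ===== CLAIM (what is proved, stated in full; the proofs are below) =====
def Claim_equal_capital_sequences : Prop := ∀ (mail : String), Dom_capital_sequences mail → Spec_capital_sequences mail (capital_sequences mail)


-- ===== LEMMAS AND PROOFS =====

-- reference decomposition of a char list into its maximal uppercase runs
def runsSpec : List Char → List (List Char)
  | [] => []
  | c :: cs =>
    if PySem.Chars.isupper c then
      (c :: cs.takeWhile PySem.Chars.isupper) :: runsSpec (cs.dropWhile PySem.Chars.isupper)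
    else runsSpec cs
termination_by l => l.length
decreasing_by
  · have := List.length_dropWhile_le (p := PySem.Chars.isupper) (l := cs); simp; omega
  · simp

theorem takeWhile_append_all (p : Char → Bool) (l rest : List Char) (h : ∀ c ∈ l, p c = true) :
    (l ++ rest).takeWhile p = l ++ rest.takeWhile p := by
  induction l with
  | nil => simp
  | cons c cs ih => simp_all

theorem dropWhile_append_all (p : Char → Bool) (l rest : List Char) (h : ∀ c ∈ l, p c = true) :
    (l ++ rest).dropWhile p = rest.dropWhile p := by
  induction l with
  | nil => simp
  | cons c cs ih => simp_all

theorem takeWhile_eq_take' (p : Char → Bool) (l : List Char) :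
    l.takeWhile p = l.take (l.takeWhile p).length := by
  induction l with
  | nil => simp
  | cons c cs ih =>
    by_cases hc : p c = true
    · simp [hc, List.take_succ_cons, ← ih]
    · simp [hc]

theorem dropWhile_eq_drop' (p : Char → Bool) (l : List Char) :
    l.dropWhile p = l.drop (l.takeWhile p).length := by
  induction l with
  | nil => simp
  | cons c cs ih =>
    by_cases hc : p c = true
    · simp [hc, ih]
    · simp [hc]

theorem runsSpec_all_upper (cur : List Char) (h : ∀ c ∈ cur, PySem.Chars.isupper c = true) :
    runsSpec cur = if cur.length > 0 then [cur] else [] := by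
  cases cur with
  | nil => simp [runsSpec]
  | cons c cs =>
    have hc := h c (by simp)
    have hcs : ∀ d ∈ cs, PySem.Chars.isupper d = true := fun d hd => h d (by simp [hd])
    rw [runsSpec]
    simp [hc, List.takeWhile_eq_self_iff.mpr hcs, List.dropWhile_eq_nil_iff.mpr hcs, runsSpec]

-- A's loop with pending all-uppercase run `cur` computes `seq` plus the runs of `cur ++ cs`
theorem foldA_runs (cs : List Char) (seq : List String) (cur : List Char)
    (h : ∀ c ∈ cur, PySem.Chars.isupper c = true) :
    (let st := cs.foldl csStep (seq, cur)
     if st.2.length > 0 then st.1 ++ [String.ofList st.2] else st.1)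
      = seq ++ (runsSpec (cur ++ cs)).map String.ofList := by
  induction cs generalizing seq cur with
  | nil =>
    simp only [List.foldl_nil, List.append_nil, runsSpec_all_upper cur h]
    cases cur <;> simp
  | cons c cs ih =>
    by_cases hu : PySem.Chars.isupper c = true
    · have h' : ∀ d ∈ cur ++ [c], PySem.Chars.isupper d = true := by
        intro d hd; rcases List.mem_append.mp hd with h1 | h1
        · exact h d h1
        · simp at h1; simpa [h1] using hu
      have := ih seq (cur ++ [c]) h'
      simpa [csStep, hu, List.append_assoc] using this
    · have hr : runsSpec (c :: cs) = runsSpec cs := by rw [runsSpec]; simp [hu]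
      cases cur with
      | nil =>
        have := ih seq [] (by simp)
        simpa [csStep, hu, hr] using this
      | cons u cur' =>
        have hu' := h u (by simp)
        have hcur' : ∀ d ∈ cur', PySem.Chars.isupper d = true := fun d hd => h d (by simp [hd])
        have step : csStep (seq, u :: cur') c = (seq ++ [String.ofList (u :: cur')], ([] : List Char)) := by
          simp [csStep, hu]
        have h2 : runsSpec ((u :: cur') ++ c :: cs) = (u :: cur') :: runsSpec cs := by
          rw [List.cons_append, runsSpec]
          rw [takeWhile_append_all _ _ _ hcur', dropWhile_append_all _ _ _ hcur']
          simp [hu', hu, hr]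
        have := ih (seq ++ [String.ofList (u :: cur')]) [] (by simp)
        rw [List.foldl_cons, step, this, h2]
        simp

theorem bScan_eq (cs : List Char) (j : Nat) :
    bScan cs j = j + ((cs.drop j).takeWhile PySem.Chars.isupper).length := by
  fun_induction bScan cs j with
  | case1 j hj hu ih =>
    rw [ih, List.drop_eq_getElem_cons hj, List.takeWhile_cons, hu]
    simp; omega
  | case2 j hj hu =>
    rw [List.drop_eq_getElem_cons hj, List.takeWhile_cons, if_neg hu]
    simp
  | case3 j hj =>
    rw [List.drop_eq_nil_of_le (by omega)]
    simp

theorem bGo_runs (cs : List Char) (i : Nat) (res : List String) :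
    bGo cs i res = res ++ (runsSpec (cs.drop i)).map String.ofList := by
  fun_induction bGo cs i res with
  | case1 i res h hu j ih =>
    rw [ih]
    have hj : j = (i + 1) + ((cs.drop (i + 1)).takeWhile PySem.Chars.isupper).length := bScan_eq cs (i + 1)
    have hslice : PySem.List.slice cs (some (i : Int)) (some (j : Int))
        = cs[i] :: (cs.drop (i + 1)).takeWhile PySem.Chars.isupper := by
      rw [PySem.List.slice_natCast]
      rw [List.drop_eq_getElem_cons h]
      have he : j - i = ((cs.drop (i + 1)).takeWhile PySem.Chars.isupper).length + 1 := by omega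
      rw [he, List.take_succ_cons]
      rw [takeWhile_eq_take' PySem.Chars.isupper (cs.drop (i + 1))]
      simp
    have hdropj : cs.drop j = (cs.drop (i + 1)).dropWhile PySem.Chars.isupper := by
      rw [hj, ← List.drop_drop, ← dropWhile_eq_drop']
    rw [List.drop_eq_getElem_cons h, runsSpec]
    rw [hslice, hdropj]
    simp [hu]
  | case2 i res h hu ih =>
    rw [ih, List.drop_eq_getElem_cons h, runsSpec]
    simp [hu]
  | case3 i res h =>
    rw [List.drop_eq_nil_of_le (by omega)]
    simp [runsSpec]

-- ===== VERDICT (by name: the statement is the Claim_ definition above) =====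
theorem capital_sequences_spec : Claim_equal_capital_sequences := by
  intro mail _
  unfold Spec_capital_sequences capital_sequences capital_sequences_alt
  rw [bGo_runs]
  simpa using foldA_runs mail.toList [] [] (by simp)
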